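-- pv_equiv track=rewrite | github.com/yubin-park/hccpy | hccpy/_V0519F3M.py | _child
-- ===== SOURCE A (Python) =====
-- from collections import Counter
--
-- def _child(cc_lst):
--
--     x = Counter(cc_lst)
--     z = Counter()
--
--     # Mandatory for children
--     x["HHS_HCC064"] = 0
--     x["HHS_HCC242"] = 0
--     x["HHS_HCC243"] = 0
--     x["HHS_HCC244"] = 0
--     x["HHS_HCC245"] = 0
--     x["HHS_HCC246"] = 0
--     x["HHS_HCC247"] = 0
--     x["HHS_HCC248"] = 0
--     x["HHS_HCC249"] = 0
--
--     gvarmap = {"G01": ["HHS_HCC019", "HHS_HCC020", "HHS_HCC021"],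
--             "G02A": ["HHS_HCC026", "HHS_HCC027",
--                         "HHS_HCC029", "HHS_HCC030"],
--             "G03": ["HHS_HCC054", "HHS_HCC055"],
--             "G04": ["HHS_HCC061", "HHS_HCC062"],
--             "G06": ["HHS_HCC067", "HHS_HCC068"],
--             "G07": ["HHS_HCC069", "HHS_HCC070", "HHS_HCC071"],
--             "G08": ["HHS_HCC073", "HHS_HCC074"],
--             "G09": ["HHS_HCC081", "HHS_HCC082"],
--             "G10": ["HHS_HCC106", "HHS_HCC107"],
--             "G11": ["HHS_HCC108", "HHS_HCC109"],
--             "G12": ["HHS_HCC117", "HHS_HCC119"],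
--             "G13": ["HHS_HCC126", "HHS_HCC127"],
--             "G14": ["HHS_HCC128", "HHS_HCC129"],
--             "G15": ["HHS_HCC160", "HHS_HCC161"],
--             "G16": ["HHS_HCC187", "HHS_HCC188"],
--             "G17": ["HHS_HCC203", "HHS_HCC204", "HHS_HCC205"],
--             "G18": ["HHS_HCC207", "HHS_HCC208", "HHS_HCC209"]}
--     for gvar, cc_lst in gvarmap.items():
--         for cc in cc_lst:
--             if x[cc] > 0:
--                 x[gvar] = 1
--                 x[cc] = 0
--
--     cc_lst = [k for k, v in x.items() if v > 0]
--
--     return cc_lst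
-- ===== SOURCE B (Python) =====
-- _MANDATORY = frozenset([
--     "HHS_HCC064", "HHS_HCC242", "HHS_HCC243", "HHS_HCC244", "HHS_HCC245",
--     "HHS_HCC246", "HHS_HCC247", "HHS_HCC248", "HHS_HCC249"])
--
-- _GVARMAP = {"G01": ["HHS_HCC019", "HHS_HCC020", "HHS_HCC021"],
--             "G02A": ["HHS_HCC026", "HHS_HCC027",
--                      "HHS_HCC029", "HHS_HCC030"],
--             "G03": ["HHS_HCC054", "HHS_HCC055"],
--             "G04": ["HHS_HCC061", "HHS_HCC062"],
--             "G06": ["HHS_HCC067", "HHS_HCC068"],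
--             "G07": ["HHS_HCC069", "HHS_HCC070", "HHS_HCC071"],
--             "G08": ["HHS_HCC073", "HHS_HCC074"],
--             "G09": ["HHS_HCC081", "HHS_HCC082"],
--             "G10": ["HHS_HCC106", "HHS_HCC107"],
--             "G11": ["HHS_HCC108", "HHS_HCC109"],
--             "G12": ["HHS_HCC117", "HHS_HCC119"],
--             "G13": ["HHS_HCC126", "HHS_HCC127"],
--             "G14": ["HHS_HCC128", "HHS_HCC129"],
--             "G15": ["HHS_HCC160", "HHS_HCC161"],
--             "G16": ["HHS_HCC187", "HHS_HCC188"],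
--             "G17": ["HHS_HCC203", "HHS_HCC204", "HHS_HCC205"],
--             "G18": ["HHS_HCC207", "HHS_HCC208", "HHS_HCC209"]}
--
-- _REV = {cc: gvar for gvar, ccs in _GVARMAP.items() for cc in ccs}
--
--
-- def _child(cc_lst):
--     active = set()
--     out = []
--     for code in dict.fromkeys(cc_lst):
--         if code in _MANDATORY:
--             continue
--         gvar = _REV.get(code)
--         if gvar is not None:
--             active.add(gvar)
--         else:
--             out.append(code)
--     out.extend(g for g in _GVARMAP if g in active)
--     return out
-- ===== Notes on version B (the rewrite author's own statement) =====
-- stated objective: alternative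
-- what changed: B replaces A's Counter-dict mutation (build a counter, zero nine mandatory keys, nested scan of the 17-group map flipping dict values, then filter items by value) with a precomputed reverse code-to-group index and one pass over the distinct input codes that emits surviving codes directly and marks active groups, appending the group variables at the end.
-- outside the precondition, e.g. on _child(['G01', 'HHS_HCC019']): A returns ['G01'], B returns ['G01', 'G01']
import Mathlib
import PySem

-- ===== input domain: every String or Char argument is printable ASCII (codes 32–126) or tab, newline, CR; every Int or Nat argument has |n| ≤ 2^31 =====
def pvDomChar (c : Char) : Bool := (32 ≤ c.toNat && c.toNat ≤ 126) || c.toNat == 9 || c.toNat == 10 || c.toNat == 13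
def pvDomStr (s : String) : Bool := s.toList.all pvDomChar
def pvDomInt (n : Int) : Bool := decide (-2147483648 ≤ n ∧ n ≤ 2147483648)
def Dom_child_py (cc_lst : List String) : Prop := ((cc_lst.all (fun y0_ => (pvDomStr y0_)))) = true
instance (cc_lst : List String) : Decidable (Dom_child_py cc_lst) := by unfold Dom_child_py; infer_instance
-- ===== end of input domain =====

-- B replaces A's Counter plus a nested scan over the group map by a reverse code→group index and one
-- pass over the distinct codes (objective: alternative decomposition, same asymptotic cost).

-- ===== PORT A =====
def gvarsA : List (String × List String) :=
  [("G01", ["HHS_HCC019", "HHS_HCC020", "HHS_HCC021"]),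
   ("G02A", ["HHS_HCC026", "HHS_HCC027", "HHS_HCC029", "HHS_HCC030"]),
   ("G03", ["HHS_HCC054", "HHS_HCC055"]),
   ("G04", ["HHS_HCC061", "HHS_HCC062"]),
   ("G06", ["HHS_HCC067", "HHS_HCC068"]),
   ("G07", ["HHS_HCC069", "HHS_HCC070", "HHS_HCC071"]),
   ("G08", ["HHS_HCC073", "HHS_HCC074"]),
   ("G09", ["HHS_HCC081", "HHS_HCC082"]),
   ("G10", ["HHS_HCC106", "HHS_HCC107"]),
   ("G11", ["HHS_HCC108", "HHS_HCC109"]),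
   ("G12", ["HHS_HCC117", "HHS_HCC119"]),
   ("G13", ["HHS_HCC126", "HHS_HCC127"]),
   ("G14", ["HHS_HCC128", "HHS_HCC129"]),
   ("G15", ["HHS_HCC160", "HHS_HCC161"]),
   ("G16", ["HHS_HCC187", "HHS_HCC188"]),
   ("G17", ["HHS_HCC203", "HHS_HCC204", "HHS_HCC205"]),
   ("G18", ["HHS_HCC207", "HHS_HCC208", "HHS_HCC209"])]

def child_py (cc_lst : List String) : List String :=
  let x := PySem.Dict.counter cc_lst
  let x := ((((((((x.insert "HHS_HCC064" 0).insert "HHS_HCC242" 0).insert "HHS_HCC243" 0).insert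
      "HHS_HCC244" 0).insert "HHS_HCC245" 0).insert "HHS_HCC246" 0).insert "HHS_HCC247" 0).insert
      "HHS_HCC248" 0).insert "HHS_HCC249" 0
  let x := gvarsA.foldl (fun d p =>
    p.2.foldl (fun d cc => if d.getD cc 0 > 0 then (d.insert p.1 1).insert cc 0 else d) d) x
  (x.items.filter (fun kv => kv.2 > 0)).map Prod.fst

-- ===== PORT B =====
def mandB : List String :=
  ["HHS_HCC064", "HHS_HCC242", "HHS_HCC243", "HHS_HCC244", "HHS_HCC245",
   "HHS_HCC246", "HHS_HCC247", "HHS_HCC248", "HHS_HCC249"]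

def gvarsB : List (String × List String) :=
  [("G01", ["HHS_HCC019", "HHS_HCC020", "HHS_HCC021"]),
   ("G02A", ["HHS_HCC026", "HHS_HCC027", "HHS_HCC029", "HHS_HCC030"]),
   ("G03", ["HHS_HCC054", "HHS_HCC055"]),
   ("G04", ["HHS_HCC061", "HHS_HCC062"]),
   ("G06", ["HHS_HCC067", "HHS_HCC068"]),
   ("G07", ["HHS_HCC069", "HHS_HCC070", "HHS_HCC071"]),
   ("G08", ["HHS_HCC073", "HHS_HCC074"]),
   ("G09", ["HHS_HCC081", "HHS_HCC082"]),
   ("G10", ["HHS_HCC106", "HHS_HCC107"]),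
   ("G11", ["HHS_HCC108", "HHS_HCC109"]),
   ("G12", ["HHS_HCC117", "HHS_HCC119"]),
   ("G13", ["HHS_HCC126", "HHS_HCC127"]),
   ("G14", ["HHS_HCC128", "HHS_HCC129"]),
   ("G15", ["HHS_HCC160", "HHS_HCC161"]),
   ("G16", ["HHS_HCC187", "HHS_HCC188"]),
   ("G17", ["HHS_HCC203", "HHS_HCC204", "HHS_HCC205"]),
   ("G18", ["HHS_HCC207", "HHS_HCC208", "HHS_HCC209"])]

def revB : PySem.Dict String String :=
  PySem.Dict.ofList (gvarsB.flatMap (fun p => p.2.map (fun cc => (cc, p.1))))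

def child_py_alt (cc_lst : List String) : List String :=
  let st := (PySem.List.dedup cc_lst).foldl
    (fun (st : PySem.Set String × List String) code =>
      if mandB.contains code then st
      else match revB.get? code with
        | some g => (PySem.Set.add st.1 g, st.2)
        | none => (st.1, st.2 ++ [code]))
    (PySem.Set.empty, [])
  st.2 ++ (gvarsB.filter (fun p => PySem.Set.contains st.1 p.1)).map Prod.fst

-- ===== PRECONDITION & SPEC =====
-- Pre_ excludes lists that contain a group-variable name together with a member code of that same
-- group: there A keeps the group variable at the colliding Counter key's original position while B
-- appends it, both behaviours being accidents of an out-of-domain input (codes named like outputs).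
def preGroups : List (String × List String) :=
  [("G01", ["HHS_HCC019", "HHS_HCC020", "HHS_HCC021"]),
   ("G02A", ["HHS_HCC026", "HHS_HCC027", "HHS_HCC029", "HHS_HCC030"]),
   ("G03", ["HHS_HCC054", "HHS_HCC055"]),
   ("G04", ["HHS_HCC061", "HHS_HCC062"]),
   ("G06", ["HHS_HCC067", "HHS_HCC068"]),
   ("G07", ["HHS_HCC069", "HHS_HCC070", "HHS_HCC071"]),
   ("G08", ["HHS_HCC073", "HHS_HCC074"]),
   ("G09", ["HHS_HCC081", "HHS_HCC082"]),
   ("G10", ["HHS_HCC106", "HHS_HCC107"]),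
   ("G11", ["HHS_HCC108", "HHS_HCC109"]),
   ("G12", ["HHS_HCC117", "HHS_HCC119"]),
   ("G13", ["HHS_HCC126", "HHS_HCC127"]),
   ("G14", ["HHS_HCC128", "HHS_HCC129"]),
   ("G15", ["HHS_HCC160", "HHS_HCC161"]),
   ("G16", ["HHS_HCC187", "HHS_HCC188"]),
   ("G17", ["HHS_HCC203", "HHS_HCC204", "HHS_HCC205"]),
   ("G18", ["HHS_HCC207", "HHS_HCC208", "HHS_HCC209"])]

def Pre_child_py (cc_lst : List String) : Prop :=
  ∀ p ∈ preGroups, p.1 ∈ cc_lst → ∀ cc ∈ p.2, cc ∉ cc_lst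
instance (cc_lst : List String) : Decidable (Pre_child_py cc_lst) := by
  unfold Pre_child_py; infer_instance

def pvWitness_child_py : List String := ["HHS_HCC001", "HHS_HCC019", "HHS_HCC019", "HHS_HCC064"]

def Spec_child_py (cc_lst : List String) (out : List String) : Prop := out = child_py_alt cc_lst
instance (cc_lst : List String) (out : List String) : Decidable (Spec_child_py cc_lst out) := by unfold Spec_child_py; infer_instance

-- ===== CLAIM (what is proved, stated in full; the proofs are below) =====
def Claim_equal_child_py : Prop := ∀ (cc_lst : List String), Dom_child_py cc_lst → Pre_child_py cc_lst → Spec_child_py cc_lst (child_py cc_lst)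


-- ===== LEMMAS AND PROOFS =====

-- step of A's inner loop over one group's member codes
def innerF (g : String) (d : PySem.Dict String Int) (ccs : List String) : PySem.Dict String Int :=
  ccs.foldl (fun d cc => if d.getD cc 0 > 0 then (d.insert g 1).insert cc 0 else d) d

-- "this group fires": some member code has a positive count in d
def trigB (d : PySem.Dict String Int) (ccs : List String) : Bool :=
  ccs.any fun cc => decide (d.getD cc 0 > 0)

lemma contains_of_getD_pos (d : PySem.Dict String Int) (k : String) (h : d.getD k 0 > 0) :
    d.contains k = true := by
  by_contra hc
  have hf : d.contains k = false := by
    cases hcc : d.contains k with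
    | false => rfl
    | true => exact absurd hcc hc
  have := PySem.Dict.getD_of_not_contains d (0 : Int) hf
  omega

lemma inner_keys (ccs : List String) (g : String) (d : PySem.Dict String Int)
    (hg : g ∉ ccs) :
    (innerF g d ccs).keys =
      if trigB d ccs = true ∧ g ∉ d.keys then d.keys ++ [g] else d.keys := by
  induction ccs generalizing d with
  | nil => simp [innerF, trigB]
  | cons cc rest ih =>
    have hgr : g ∉ rest := fun h => hg (List.mem_cons_of_mem _ h)
    have hgcc : g ≠ cc := fun h => hg (h ▸ List.mem_cons_self ..)
    simp only [innerF, List.foldl_cons] at *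
    by_cases h : d.getD cc 0 > 0
    · rw [if_pos h]
      have htrig : trigB d (cc :: rest) = true := by
        simp [trigB, List.any_cons]; left; exact h
      have hccK : d.contains cc = true := contains_of_getD_pos d cc h
      have hccK' : (d.insert g 1).contains cc = true := by
        rw [PySem.Dict.contains_insert]; simp [hccK]
      have hkeys' : ((d.insert g 1).insert cc 0).keys =
          if g ∈ d.keys then d.keys else d.keys ++ [g] := by
        rw [PySem.Dict.keys_insert_of_contains _ _ hccK']
        by_cases hgk : g ∈ d.keys
        · rw [if_pos hgk, PySem.Dict.keys_insert_of_contains]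
          rw [(PySem.Dict.contains_iff_mem_keys d g).2 hgk]
        · rw [if_neg hgk, PySem.Dict.keys_insert_of_not_contains]
          cases hc : d.contains g with
          | false => rfl
          | true => exact absurd ((PySem.Dict.contains_iff_mem_keys d g).1 hc) hgk
      have hgmem : g ∈ ((d.insert g 1).insert cc 0).keys := by
        rw [hkeys']
        by_cases hgk : g ∈ d.keys
        · rw [if_pos hgk]; exact hgk
        · rw [if_neg hgk]; exact List.mem_append_right _ (List.mem_singleton.2 rfl)
      rw [ih _ hgr]
      rw [if_neg (by rintro ⟨-, hx⟩; exact hx hgmem)]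
      rw [hkeys', htrig]
      by_cases hgk : g ∈ d.keys
      · rw [if_pos hgk, if_neg (by rintro ⟨-, hx⟩; exact hx hgk)]
      · rw [if_neg hgk, if_pos ⟨rfl, hgk⟩]
    · rw [if_neg h]
      have htrig : trigB d (cc :: rest) = trigB d rest := by
        simp [trigB, List.any_cons, h]
      rw [ih _ hgr, htrig]

lemma inner_getD (ccs : List String) (g : String) (d : PySem.Dict String Int)
    (hg : g ∉ ccs) (hnd : ccs.Nodup) (k : String) :
    (innerF g d ccs).getD k 0 =
      if k = g then (if trigB d ccs = true then 1 else d.getD g 0)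
      else if k ∈ ccs then (if d.getD k 0 > 0 then 0 else d.getD k 0)
      else d.getD k 0 := by
  induction ccs generalizing d with
  | nil =>
    simp only [innerF, List.foldl_nil, trigB, List.any_nil]
    split_ifs with h1 h2 <;> simp_all
  | cons cc rest ih =>
    have hgr : g ∉ rest := fun h => hg (List.mem_cons_of_mem _ h)
    have hgcc : g ≠ cc := fun h => hg (h ▸ List.mem_cons_self)
    have hccr : cc ∉ rest := (List.nodup_cons.1 hnd).1
    have hndr : rest.Nodup := (List.nodup_cons.1 hnd).2
    simp only [innerF, List.foldl_cons] at *
    by_cases h : d.getD cc 0 > 0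
    · rw [if_pos h]
      have htrig : trigB d (cc :: rest) = true := by
        simp [trigB, List.any_cons]; left; exact h
      set d' := (d.insert g 1).insert cc 0 with hd'
      have hD : ∀ j : String, d'.getD j 0 =
          if j = cc then 0 else if j = g then 1 else d.getD j 0 := by
        intro j
        rw [hd', PySem.Dict.getD_insert, PySem.Dict.getD_insert]
      rw [ih _ hgr hndr, htrig]
      by_cases hkg : k = g
      · subst hkg
        rw [if_pos rfl, if_pos rfl, hD, if_neg hgcc, if_pos rfl]
        split <;> simp
      · rw [if_neg hkg, if_neg hkg]
        by_cases hkcc : k = cc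
        · subst hkcc
          rw [if_neg hccr, hD, if_pos rfl,
            if_pos (List.mem_cons_self), if_pos h]
        · rw [hD, if_neg hkcc, if_neg hkg]
          by_cases hkr : k ∈ rest
          · rw [if_pos hkr, if_pos (List.mem_cons_of_mem _ hkr)]
          · rw [if_neg hkr, if_neg (by simp [List.mem_cons, hkcc, hkr])]
    · rw [if_neg h]
      have htrig : trigB d (cc :: rest) = trigB d rest := by
        simp [trigB, List.any_cons, h]
      rw [ih _ hgr hndr, htrig]
      by_cases hkg : k = g
      · rw [if_pos hkg, if_pos hkg]
      · rw [if_neg hkg, if_neg hkg]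
        by_cases hkcc : k = cc
        · subst hkcc
          rw [if_neg hccr, if_pos (List.mem_cons_self), if_neg h]
        · by_cases hkr : k ∈ rest
          · rw [if_pos hkr, if_pos (List.mem_cons_of_mem _ hkr)]
          · rw [if_neg hkr, if_neg (by simp [List.mem_cons, hkcc, hkr])]

-- A's outer loop over the whole group map
def outerF (gs : List (String × List String)) (d : PySem.Dict String Int) : PySem.Dict String Int :=
  gs.foldl (fun d p => innerF p.1 d p.2) d

lemma outer_spec (gs : List (String × List String)) (d : PySem.Dict String Int)
    (htrig : ∀ p ∈ gs, trigB d p.2 = true → p.1 ∉ d.keys)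
    (hfst : (gs.map Prod.fst).Nodup)
    (hccs : (gs.flatMap Prod.snd).Nodup)
    (hdis : ∀ p ∈ gs, ∀ q ∈ gs, p.1 ∉ q.2) :
    (outerF gs d).keys = d.keys ++ (gs.filter (fun p => trigB d p.2)).map Prod.fst
    ∧ (∀ p ∈ gs, (outerF gs d).getD p.1 0 =
        if trigB d p.2 = true then 1 else d.getD p.1 0)
    ∧ (∀ k, k ∉ gs.map Prod.fst → (outerF gs d).getD k 0 =
        if k ∈ gs.flatMap Prod.snd ∧ d.getD k 0 > 0 then 0 else d.getD k 0) := by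
  induction gs generalizing d with
  | nil =>
    refine ⟨by simp [outerF], by simp, ?_⟩
    intro k _
    simp [outerF]
  | cons p t ih =>
    have hmemp : p ∈ p :: t := List.mem_cons_self
    have hsplit : ((p :: t).flatMap Prod.snd) = p.2 ++ t.flatMap Prod.snd := by
      simp [List.flatMap_cons]
    rw [hsplit] at hccs
    have hp2 : p.2.Nodup := (List.nodup_append.1 hccs).1
    have htnd : (t.flatMap Prod.snd).Nodup := (List.nodup_append.1 hccs).2.1
    have hdisj : ∀ cc ∈ p.2, cc ∉ t.flatMap Prod.snd := by
      intro cc hcc hmem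
      exact (List.nodup_append.1 hccs).2.2 cc hcc cc hmem rfl
    have hgp : p.1 ∉ p.2 := hdis p hmemp p hmemp
    have hpt : p.1 ∉ t.map Prod.fst := (List.nodup_cons.1 (by simpa using hfst)).1
    have hfst' : (t.map Prod.fst).Nodup := (List.nodup_cons.1 (by simpa using hfst)).2
    set d' := innerF p.1 d p.2 with hd'
    have hK' : d'.keys = if trigB d p.2 = true then d.keys ++ [p.1] else d.keys := by
      rw [hd', inner_keys _ _ _ hgp]
      by_cases ht : trigB d p.2 = true
      · rw [if_pos ht, if_pos ⟨ht, htrig p hmemp ht⟩]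
      · rw [if_neg ht, if_neg (by rintro ⟨hx, -⟩; exact ht hx)]
    have hpres : ∀ j, j ≠ p.1 → j ∉ p.2 → d'.getD j 0 = d.getD j 0 := by
      intro j hj1 hj2
      rw [hd', inner_getD _ _ _ hgp hp2, if_neg hj1, if_neg hj2]
    have htrigeq : ∀ q ∈ t, trigB d' q.2 = trigB d q.2 := by
      intro q hq
      unfold trigB
      refine PySem.List.any_congr_mem ?_
      intro cc hcc
      have h1 : cc ≠ p.1 := by
        intro h
        exact hdis p hmemp q (List.mem_cons_of_mem _ hq) (h ▸ hcc)
      have h2 : cc ∉ p.2 := by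
        intro h
        exact hdisj cc h (List.mem_flatMap.2 ⟨q, hq, hcc⟩)
      rw [hpres cc h1 h2]
    have hsubk : ∀ j, j ∈ d'.keys → j ∈ d.keys ∨ j = p.1 := by
      intro j hj
      rw [hK'] at hj
      by_cases ht : trigB d p.2 = true
      · rw [if_pos ht] at hj
        rcases List.mem_append.1 hj with h | h
        · exact Or.inl h
        · exact Or.inr (List.mem_singleton.1 h)
      · rw [if_neg ht] at hj; exact Or.inl hj
    have htrig' : ∀ q ∈ t, trigB d' q.2 = true → q.1 ∉ d'.keys := by
      intro q hq hqt hmem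
      have hqd : trigB d q.2 = true := by rw [← htrigeq q hq]; exact hqt
      rcases hsubk _ hmem with h | h
      · exact htrig q (List.mem_cons_of_mem _ hq) hqd h
      · exact hpt (h ▸ List.mem_map.2 ⟨q, hq, rfl⟩)
    have hdis' : ∀ a ∈ t, ∀ b ∈ t, a.1 ∉ b.2 := by
      intro a ha b hb
      exact hdis a (List.mem_cons_of_mem _ ha) b (List.mem_cons_of_mem _ hb)
    obtain ⟨ihK, ihA, ihB⟩ := ih d' htrig' hfst' htnd hdis'
    have houter : outerF (p :: t) d = outerF t d' := by
      rw [hd']; rfl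
    have hfiltereq : t.filter (fun q => trigB d' q.2) = t.filter (fun q => trigB d q.2) :=
      List.filter_congr (fun q hq => htrigeq q hq)
    refine ⟨?_, ?_, ?_⟩
    · rw [houter, ihK, hfiltereq, hK']
      by_cases ht : trigB d p.2 = true
      · rw [if_pos ht]
        simp [ht, List.append_assoc]
      · rw [if_neg ht]
        simp [ht]
    · intro q hq
      rcases List.mem_cons.1 hq with rfl | hq'
      · have hnf : q.1 ∉ t.map Prod.fst := hpt
        have hnc : ¬(q.1 ∈ t.flatMap Prod.snd ∧ d'.getD q.1 0 > 0) := by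
          rintro ⟨hmem, -⟩
          obtain ⟨r, hr, hrc⟩ := List.mem_flatMap.1 hmem
          exact hdis q hmemp r (List.mem_cons_of_mem _ hr) hrc
        rw [houter, ihB q.1 hnf, if_neg hnc, hd',
          inner_getD _ _ _ hgp hp2, if_pos rfl]
      · rw [houter, ihA q hq', htrigeq q hq']
        by_cases ht : trigB d q.2 = true
        · rw [if_pos ht, if_pos ht]
        · rw [if_neg ht, if_neg ht]
          refine hpres q.1 ?_ (hdis q (List.mem_cons_of_mem _ hq') p hmemp)
          intro h
          exact hpt (h ▸ List.mem_map.2 ⟨q, hq', rfl⟩)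
    · intro k hk
      have hk1 : k ≠ p.1 := by
        intro h; exact hk (h ▸ List.mem_map.2 ⟨p, hmemp, rfl⟩)
      have hk2 : k ∉ t.map Prod.fst := by
        intro h; exact hk (List.mem_cons_of_mem _ (by simpa using h))
      rw [houter, ihB k hk2]
      by_cases hkp : k ∈ p.2
      · have hknt : k ∉ t.flatMap Prod.snd := hdisj k hkp
        have hdk : d'.getD k 0 = if d.getD k 0 > 0 then 0 else d.getD k 0 := by
          rw [hd', inner_getD _ _ _ hgp hp2, if_neg hk1, if_pos hkp]
        rw [if_neg (by rintro ⟨hx, -⟩; exact hknt hx), hdk]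
        have hmem : k ∈ (p :: t).flatMap Prod.snd := by
          rw [hsplit]; exact List.mem_append_left _ hkp
        by_cases hpos : d.getD k 0 > 0
        · rw [if_pos hpos, if_pos ⟨hmem, hpos⟩]
        · rw [if_neg hpos, if_neg (by rintro ⟨-, hx⟩; exact hpos hx)]
      · have hdk : d'.getD k 0 = d.getD k 0 := hpres k hk1 hkp
        rw [hdk]
        have hmemiff : (k ∈ (p :: t).flatMap Prod.snd) ↔ k ∈ t.flatMap Prod.snd := by
          rw [hsplit]; simp [List.mem_append, hkp]
        by_cases hc : k ∈ t.flatMap Prod.snd ∧ d.getD k 0 > 0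
        · rw [if_pos hc, if_pos ⟨hmemiff.2 hc.1, hc.2⟩]
        · rw [if_neg hc, if_neg (by rintro ⟨hx, hy⟩; exact hc ⟨hmemiff.1 hx, hy⟩)]

lemma getD_foldl_insert_const (ms : List String) (d : PySem.Dict String Int) (k : String) :
    (ms.foldl (fun d m => d.insert m 0) d).getD k 0 = if k ∈ ms then 0 else d.getD k 0 := by
  induction ms generalizing d with
  | nil => simp
  | cons m t ih =>
    rw [List.foldl_cons, ih]
    by_cases hkt : k ∈ t
    · rw [if_pos hkt, if_pos (List.mem_cons_of_mem _ hkt)]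
    · rw [if_neg hkt, PySem.Dict.getD_insert]
      by_cases hkm : k = m
      · rw [if_pos hkm, if_pos (hkm ▸ List.mem_cons_self)]
      · rw [if_neg hkm, if_neg (by simp [List.mem_cons, hkm, hkt])]

lemma set_update_exists (l : List String) (s : PySem.Set String) :
    ∃ ext, PySem.Set.update s l = s ++ ext ∧ ∀ x ∈ ext, x ∈ l := by
  induction l generalizing s with
  | nil => exact ⟨[], by simp [PySem.Set.update], by simp⟩
  | cons a t ih =>
    have hupd : PySem.Set.update s (a :: t) = PySem.Set.update (PySem.Set.add s a) t := rfl
    obtain ⟨ext, hext, hmem⟩ := ih (PySem.Set.add s a)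
    by_cases hc : a ∈ s
    · refine ⟨ext, ?_, fun x hx => List.mem_cons_of_mem _ (hmem x hx)⟩
      rw [hupd, hext]
      congr 1
      simp [PySem.Set.add, hc]
    · refine ⟨a :: ext, ?_, ?_⟩
      · rw [hupd, hext]
        have hadd : PySem.Set.add s a = s ++ [a] := by simp [PySem.Set.add, hc]
        rw [hadd, List.append_assoc]
        rfl
      · intro x hx
        rcases List.mem_cons.1 hx with rfl | hx'
        · exact List.mem_cons_self
        · exact List.mem_cons_of_mem _ (hmem x hx')

-- B's group-accumulator step and output step
def activeStep (s : PySem.Set String) (code : String) : PySem.Set String :=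
  if mandB.contains code then s
  else match revB.get? code with
    | some g => PySem.Set.add s g
    | none => s

def outStep (out : List String) (code : String) : List String :=
  if mandB.contains code then out
  else match revB.get? code with
    | some _ => out
    | none => out ++ [code]

lemma active_mem (l : List String) (s : PySem.Set String) (g : String) :
    g ∈ l.foldl activeStep s ↔
      g ∈ s ∨ ∃ c ∈ l, mandB.contains c = false ∧ revB.get? c = some g := by
  induction l generalizing s with
  | nil => simp
  | cons c t ih =>
    rw [List.foldl_cons, ih]
    unfold activeStep
    by_cases hm : mandB.contains c = true
    · rw [if_pos hm]
      constructor
      · rintro (h | ⟨x, hx, hxs⟩)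
        · exact Or.inl h
        · exact Or.inr ⟨x, List.mem_cons_of_mem _ hx, hxs⟩
      · rintro (h | ⟨x, hx, hx1, hx2⟩)
        · exact Or.inl h
        · rcases List.mem_cons.1 hx with rfl | hx'
          · rw [hm] at hx1; cases hx1
          · exact Or.inr ⟨x, hx', hx1, hx2⟩
    · rw [if_neg hm]
      have hm' : mandB.contains c = false := by
        cases h : mandB.contains c with
        | false => rfl
        | true => exact absurd h hm
      cases hr : revB.get? c with
      | some gv =>
        constructor
        · rintro (h | ⟨x, hx, hxs⟩)
          · rcases (PySem.Set.mem_add s gv g).1 h with h' | rfl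
            · exact Or.inl h'
            · exact Or.inr ⟨c, List.mem_cons_self, hm', hr⟩
          · exact Or.inr ⟨x, List.mem_cons_of_mem _ hx, hxs⟩
        · rintro (h | ⟨x, hx, hx1, hx2⟩)
          · exact Or.inl ((PySem.Set.mem_add s gv g).2 (Or.inl h))
          · rcases List.mem_cons.1 hx with rfl | hx'
            · rw [hr] at hx2
              exact Or.inl ((PySem.Set.mem_add s gv g).2 (Or.inr (Option.some_inj.1 hx2).symm))
            · exact Or.inr ⟨x, hx', hx1, hx2⟩
      | none =>
        constructor
        · rintro (h | ⟨x, hx, hxs⟩)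
          · exact Or.inl h
          · exact Or.inr ⟨x, List.mem_cons_of_mem _ hx, hxs⟩
        · rintro (h | ⟨x, hx, hx1, hx2⟩)
          · exact Or.inl h
          · rcases List.mem_cons.1 hx with rfl | hx'
            · rw [hr] at hx2; cases hx2
            · exact Or.inr ⟨x, hx', hx1, hx2⟩

lemma outStep_foldl (l : List String) (acc : List String) :
    l.foldl outStep acc =
      acc ++ l.filter (fun code => !mandB.contains code && (revB.get? code).isNone) := by
  have h : l.foldl outStep acc =
      l.foldl (fun acc code =>
        if (!mandB.contains code && (revB.get? code).isNone) = true
        then acc ++ [code] else acc) acc := by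
    refine PySem.List.foldl_congr_mem' l _ _ acc ?_
    intro code _ a
    unfold outStep
    by_cases hm : mandB.contains code = true
    · rw [if_pos hm, hm]
      simp
    · have hm' : mandB.contains code = false := by
        cases h : mandB.contains code with
        | false => rfl
        | true => exact absurd h hm
      rw [if_neg hm]
      cases hr : revB.get? code with
      | some gv =>
        rw [hm']
        simp
      | none =>
        rw [hm']
        simp
  rw [h, PySem.List.foldl_append_if_eq_filter]

-- the nine mandatory child codes, as a list (A writes them as nine assignments)
def mand9 : List String :=
  ["HHS_HCC064", "HHS_HCC242", "HHS_HCC243", "HHS_HCC244", "HHS_HCC245",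
   "HHS_HCC246", "HHS_HCC247", "HHS_HCC248", "HHS_HCC249"]

lemma c_fstN : (gvarsA.map Prod.fst).Nodup := by decide
lemma c_ccsN : (gvarsA.flatMap Prod.snd).Nodup := by decide
lemma c_dis : ∀ p ∈ gvarsA, ∀ q ∈ gvarsA, p.1 ∉ q.2 := by decide
lemma c_ccmand : ∀ p ∈ gvarsA, ∀ cc ∈ p.2, cc ∉ mand9 := by decide
lemma c_fstmand : ∀ p ∈ gvarsA, p.1 ∉ mand9 := by decide
lemma c_mandfst : ∀ k ∈ mand9, k ∉ gvarsA.map Prod.fst := by decide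
lemma c_fstccs : ∀ p ∈ gvarsA, p.1 ∉ gvarsA.flatMap Prod.snd := by decide
lemma c_inj : ∀ p ∈ gvarsA, ∀ q ∈ gvarsA, p.1 = q.1 → p = q := by decide

set_option maxRecDepth 4096 in
lemma rev_items : revB.items = gvarsA.flatMap (fun p => p.2.map (fun cc => (cc, p.1))) := by decide

set_option maxRecDepth 4096 in
lemma rev_keys : revB.keys = gvarsA.flatMap Prod.snd := by decide

lemma rev_nodup : revB.keys.Nodup := PySem.Dict.nodup_keys_ofList _

lemma rev_none (c : String) : revB.get? c = none ↔ c ∉ gvarsA.flatMap Prod.snd := by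
  rw [PySem.Dict.get?_eq_none_iff_not_mem_keys, rev_keys]

lemma rev_some (c g : String) :
    revB.get? c = some g ↔ ∃ p ∈ gvarsA, g = p.1 ∧ c ∈ p.2 := by
  rw [PySem.Dict.get?_eq_some_iff_mem_items _ _ _ rev_nodup, rev_items]
  constructor
  · intro h
    obtain ⟨p, hp, hmem⟩ := List.mem_flatMap.1 h
    obtain ⟨cc, hcc, heq⟩ := List.mem_map.1 hmem
    obtain ⟨h1, h2⟩ := Prod.mk.injEq .. ▸ heq
    exact ⟨p, hp, h2.symm, h1 ▸ hcc⟩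
  · rintro ⟨p, hp, rfl, hc⟩
    exact List.mem_flatMap.2 ⟨p, hp, List.mem_map.2 ⟨c, hc, rfl⟩⟩

-- A's dict state after the nine mandatory zeroings
def x1F (L : List String) : PySem.Dict String Int :=
  mand9.foldl (fun d m => d.insert m 0) (PySem.Dict.counter L)

-- A's dict state after the group loop
def x2F (L : List String) : PySem.Dict String Int := outerF gvarsA (x1F L)

lemma filter_items (d : PySem.Dict String Int) (hnd : d.keys.Nodup) :
    (d.items.filter (fun kv => kv.2 > 0)).map Prod.fst =
      d.keys.filter (fun k => decide (d.getD k 0 > 0)) := by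
  rw [PySem.Dict.items_eq_map_keys d hnd 0, List.filter_map, List.map_map]
  show List.map id (List.filter (fun k => decide (0 < d.getD k 0)) d.keys) = _
  rw [List.map_id]

set_option maxHeartbeats 2000000 in
lemma main_eq (L : List String) (hpre : Pre_child_py L) : child_py L = child_py_alt L := by
  have hpre' : ∀ p ∈ gvarsA, p.1 ∈ L → ∀ cc ∈ p.2, cc ∉ L := hpre
  have hA : child_py L = ((x2F L).items.filter (fun kv => kv.2 > 0)).map Prod.fst := by
    simp only [child_py, x2F, outerF, innerF, x1F, mand9, List.foldl_cons, List.foldl_nil]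
  -- x1 characterisation
  have hk1 : (x1F L).keys = PySem.Set.update (PySem.Set.ofList L) mand9 := by
    have h := PySem.Dict.keys_foldl_insert mand9 (fun _ _ => (0 : Int)) (PySem.Dict.counter L)
    rw [PySem.Dict.keys_counter] at h
    exact h
  have hnd1 : (x1F L).keys.Nodup :=
    PySem.Dict.nodup_keys_foldl_insert mand9 (fun _ _ => (0 : Int)) _ (PySem.Dict.nodup_keys_counter L)
  have hg1 : ∀ k, (x1F L).getD k 0 = if k ∈ mand9 then 0 else (L.count k : Int) := by
    intro k
    rw [x1F, getD_foldl_insert_const]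
    by_cases h : k ∈ mand9
    · rw [if_pos h, if_pos h]
    · rw [if_neg h, if_neg h, PySem.Dict.getD_counter]
  have htrigiff : ∀ p ∈ gvarsA, (trigB (x1F L) p.2 = true ↔ ∃ cc ∈ p.2, cc ∈ L) := by
    intro p hp
    unfold trigB
    rw [List.any_eq_true]
    constructor
    · rintro ⟨cc, hcc, hdec⟩
      have hpos : (x1F L).getD cc 0 > 0 := of_decide_eq_true hdec
      rw [hg1 cc, if_neg (c_ccmand p hp cc hcc)] at hpos
      exact ⟨cc, hcc, List.count_pos_iff.1 (Int.natCast_pos.1 hpos)⟩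
    · rintro ⟨cc, hcc, hmem⟩
      refine ⟨cc, hcc, decide_eq_true ?_⟩
      rw [hg1 cc, if_neg (c_ccmand p hp cc hcc)]
      exact Int.natCast_pos.2 (List.count_pos_iff.2 hmem)
  have htrigx1 : ∀ p ∈ gvarsA, trigB (x1F L) p.2 = true → p.1 ∉ (x1F L).keys := by
    intro p hp ht hmem
    obtain ⟨cc, hcc, hccL⟩ := (htrigiff p hp).1 ht
    rw [hk1] at hmem
    rcases (PySem.Set.mem_update (PySem.Set.ofList L) mand9 p.1).1 hmem with hm | hm
    · exact hpre' p hp ((PySem.Set.mem_ofList L p.1).1 hm) cc hcc hccL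
    · exact c_fstmand p hp hm
  obtain ⟨hK2, hA2, hB2⟩ := outer_spec gvarsA (x1F L) htrigx1 c_fstN c_ccsN c_dis
  have hnd2 : (x2F L).keys.Nodup := by
    rw [x2F, hK2, List.nodup_append]
    refine ⟨hnd1, List.Nodup.sublist (List.Sublist.map Prod.fst List.filter_sublist) c_fstN, ?_⟩
    intro a ha b hb
    rintro rfl
    obtain ⟨p, hpf, rfl⟩ := List.mem_map.1 hb
    obtain ⟨hp, htr⟩ := List.mem_filter.1 hpf
    exact htrigx1 p hp htr ha
  have hAkeys : child_py L =
      (x2F L).keys.filter (fun k => decide ((x2F L).getD k 0 > 0)) := by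
    rw [hA, filter_items _ hnd2]
  obtain ⟨ext, hup, hextm⟩ := set_update_exists mand9 (PySem.Set.ofList L)
  have hkeq : (x2F L).keys =
      (PySem.Set.ofList L ++ ext) ++
        (gvarsA.filter (fun p => trigB (x1F L) p.2)).map Prod.fst := by
    rw [x2F, hK2, hk1, hup]
  have hextnil :
      ext.filter (fun k => decide ((x2F L).getD k 0 > 0)) = [] := by
    rw [List.filter_eq_nil_iff]
    intro k hk
    have hkm : k ∈ mand9 := hextm k hk
    have hkf : k ∉ gvarsA.map Prod.fst := c_mandfst k hkm
    rw [x2F, hB2 k hkf, hg1 k, if_pos hkm]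
    simp
  have hSpart :
      (PySem.Set.ofList L).filter (fun k => decide ((x2F L).getD k 0 > 0)) =
        (PySem.Set.ofList L).filter
          (fun code => !mandB.contains code && (revB.get? code).isNone) := by
    refine List.filter_congr ?_
    intro k hkS
    have hkL : k ∈ L := (PySem.Set.mem_ofList L k).1 hkS
    have hcnt : (0 : Int) < (L.count k : Int) :=
      Int.natCast_pos.2 (List.count_pos_iff.2 hkL)
    by_cases hG : k ∈ gvarsA.map Prod.fst
    · obtain ⟨p, hp, hpk⟩ := List.mem_map.1 hG
      subst hpk
      have htf : trigB (x1F L) p.2 = false := by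
        cases h : trigB (x1F L) p.2 with
        | false => rfl
        | true =>
          exfalso
          obtain ⟨cc, hcc, hccL⟩ := (htrigiff p hp).1 h
          exact hpre' p hp hkL cc hcc hccL
      have h1 : mandB.contains p.1 = false := by
        simpa using c_fstmand p hp
      have h2 : revB.get? p.1 = none := (rev_none p.1).2 (c_fstccs p hp)
      rw [x2F, hA2 p hp, htf, hg1, if_neg (c_fstmand p hp), h1, h2]
      simp only [Bool.false_eq_true, if_false, Bool.not_false, Option.isNone_none, Bool.and_true]
      exact decide_eq_true hcnt
    · have hx2g : (x2F L).getD k 0 =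
          if k ∈ gvarsA.flatMap Prod.snd ∧ (x1F L).getD k 0 > 0 then 0
          else (x1F L).getD k 0 := hB2 k hG
      by_cases hm : k ∈ mand9
      · have h1 : mandB.contains k = true := by simpa using hm
        rw [hx2g, hg1, if_pos hm, h1]
        have hz : (if k ∈ gvarsA.flatMap Prod.snd ∧ (0:Int) > 0 then (0:Int) else 0) = 0 := by
          split <;> rfl
        rw [hz]
        rfl
      · have h1 : mandB.contains k = false := by simpa using hm
        rw [hx2g, hg1, if_neg hm]
        by_cases hf : k ∈ gvarsA.flatMap Prod.snd
        · have h2 : ¬ revB.get? k = none := fun h => ((rev_none k).1 h) hf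
          have h2' : (revB.get? k).isNone = false := by
            cases h : revB.get? k with
            | none => exact absurd h h2
            | some _ => rfl
          rw [if_pos ⟨hf, hcnt⟩, h1, h2']
          rfl
        · have h2 : revB.get? k = none := (rev_none k).2 hf
          rw [if_neg (by rintro ⟨h, -⟩; exact hf h), h1, h2]
          simp only [Bool.not_false, Option.isNone_none, Bool.and_true]
          exact decide_eq_true hcnt
  have htrigpart :
      ((gvarsA.filter (fun p => trigB (x1F L) p.2)).map Prod.fst).filter
        (fun k => decide ((x2F L).getD k 0 > 0)) =
        (gvarsA.filter (fun p => trigB (x1F L) p.2)).map Prod.fst := by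
    rw [List.filter_eq_self]
    intro k hk
    obtain ⟨p, hpf, rfl⟩ := List.mem_map.1 hk
    obtain ⟨hp, htr⟩ := List.mem_filter.1 hpf
    rw [x2F, hA2 p hp, htr]
    rfl
  -- B side
  have hbody : ∀ code ∈ PySem.Set.ofList L,
      ∀ st : PySem.Set String × List String,
      (fun (st : PySem.Set String × List String) code =>
        if mandB.contains code then st
        else match revB.get? code with
          | some g => (PySem.Set.add st.1 g, st.2)
          | none => (st.1, st.2 ++ [code])) st code =
        (activeStep st.1 code, outStep st.2 code) := by
    intro code _ st
    dsimp only
    unfold activeStep outStep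
    by_cases hm : mandB.contains code = true
    · rw [if_pos hm, if_pos hm, if_pos hm]
    · rw [if_neg hm, if_neg hm, if_neg hm]
      cases hr : revB.get? code <;> rfl
  have hfold : (PySem.List.dedup L).foldl
      (fun (st : PySem.Set String × List String) code =>
        if mandB.contains code then st
        else match revB.get? code with
          | some g => (PySem.Set.add st.1 g, st.2)
          | none => (st.1, st.2 ++ [code]))
      (PySem.Set.empty, []) =
      ((PySem.Set.ofList L).foldl activeStep PySem.Set.empty,
       (PySem.Set.ofList L).foldl outStep []) := by
    have h1 : PySem.List.dedup L = PySem.Set.ofList L := rfl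
    rw [h1, PySem.List.foldl_congr_mem' _ _ _ _
      (fun code hcode st => hbody code hcode st)]
    exact PySem.List.foldl_prod_mk activeStep outStep _ _ _
  have hBr : child_py_alt L =
      ((PySem.Set.ofList L).foldl outStep []) ++
        (gvarsB.filter (fun p =>
          PySem.Set.contains ((PySem.Set.ofList L).foldl activeStep PySem.Set.empty) p.1)).map
          Prod.fst := by
    show (((PySem.List.dedup L).foldl
      (fun (st : PySem.Set String × List String) code =>
        if mandB.contains code then st
        else match revB.get? code with
          | some g => (PySem.Set.add st.1 g, st.2)
          | none => (st.1, st.2 ++ [code]))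
      (PySem.Set.empty, [])).2 ++ _) = _
    rw [hfold]
  have hempty : ∀ g : String, g ∈ (PySem.Set.empty : PySem.Set String) → False := by
    intro g h
    cases h
  have hact : ∀ p ∈ gvarsA,
      PySem.Set.contains ((PySem.Set.ofList L).foldl activeStep PySem.Set.empty) p.1 =
        trigB (x1F L) p.2 := by
    intro p hp
    apply Bool.coe_iff_coe.mp
    rw [htrigiff p hp]
    constructor
    · intro hc
      have hmem : p.1 ∈ (PySem.Set.ofList L).foldl activeStep PySem.Set.empty := by
        simpa [PySem.Set.contains] using hc
      rcases (active_mem _ _ p.1).1 hmem with h | ⟨c, hcS, hcm, hcr⟩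
      · exact absurd h (fun h => hempty p.1 h)
      · obtain ⟨q, hq, hgq, hcq⟩ := (rev_some c p.1).1 hcr
        have hqp : q = p := c_inj q hq p hp hgq.symm
        subst hqp
        exact ⟨c, hcq, (PySem.Set.mem_ofList L c).1 hcS⟩
    · rintro ⟨cc, hcc, hccL⟩
      have hmem : p.1 ∈ (PySem.Set.ofList L).foldl activeStep PySem.Set.empty :=
        (active_mem _ _ p.1).2 (Or.inr ⟨cc, (PySem.Set.mem_ofList L cc).2 hccL,
          by simpa using c_ccmand p hp cc hcc,
          (rev_some cc p.1).2 ⟨p, hp, rfl, hcc⟩⟩)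
      simpa [PySem.Set.contains] using hmem
  have hgroups : (gvarsB.filter (fun p =>
      PySem.Set.contains ((PySem.Set.ofList L).foldl activeStep PySem.Set.empty) p.1)).map
        Prod.fst = (gvarsA.filter (fun p => trigB (x1F L) p.2)).map Prod.fst := by
    have hGB : gvarsB = gvarsA := rfl
    rw [hGB, List.filter_congr (fun p hp => hact p hp)]
  rw [hAkeys, hkeq, List.filter_append, List.filter_append, hextnil, hSpart, htrigpart,
    hBr, outStep_foldl, hgroups]
  simp

-- ===== VERDICT (by name: the statement is the Claim_ definition above) =====
theorem child_py_spec : Claim_equal_child_py := by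
  intro cc_lst _ hpre
  unfold Spec_child_py
  exact main_eq cc_lst hpre
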